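-- pv_equiv track=rewrite | github.com/vishalshirke7/DSA | arrays/reverse-pairs.py | find
-- ===== SOURCE A (Python) =====
-- def find(nums, target):
--     start, end = 0, len(nums) - 1
--     final = -1
--     while start <= end:
--         mid = (start + end) // 2
--         if nums[mid] <= target:
--             start = mid + 1
--         else:
--             end = mid - 1
--     return end - final
-- ===== SOURCE B (Python) =====
-- def find(nums, target):
--     def go(sub, offset):
--         if not sub:
--             return offset
--         k = (len(sub) - 1) // 2
--         if sub[k] <= target:
--             return go(sub[k + 1:], offset + k + 1)
--         else:
--             return go(sub[:k], offset)
--     return go(nums, 0)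
-- ===== Notes on version B (the rewrite author's own statement) =====
-- stated objective: alternative
-- what changed: Replaced A's index-based while loop with mutable start/end over the whole array by a structural recursion that probes the middle of a list slice and recurses on the physical sub-slice (sub[k+1:] or sub[:k]) while carrying an absolute offset.
import Mathlib
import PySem

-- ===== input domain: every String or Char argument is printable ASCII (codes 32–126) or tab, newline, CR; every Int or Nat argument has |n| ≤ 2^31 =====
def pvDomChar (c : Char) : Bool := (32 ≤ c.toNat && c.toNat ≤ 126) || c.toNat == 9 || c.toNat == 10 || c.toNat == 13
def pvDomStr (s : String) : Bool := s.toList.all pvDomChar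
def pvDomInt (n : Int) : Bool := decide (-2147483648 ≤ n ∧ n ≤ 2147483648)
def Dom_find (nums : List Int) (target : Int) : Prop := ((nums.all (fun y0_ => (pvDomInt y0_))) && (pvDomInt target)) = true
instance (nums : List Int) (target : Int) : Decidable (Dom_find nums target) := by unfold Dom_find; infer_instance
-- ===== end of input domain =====

-- B replaces A's index-based while loop (mutable start/end over the whole array) by a
-- structural recursion that slices the list and carries an offset; same value, alternative decomposition.

-- ===== PORT A =====
-- A's while loop: state (start, end); returns the final value of `end`
def findLoop (nums : List Int) (target : Int) (start : Int) (end_ : Int) : Int :=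
  if _h : start ≤ end_ then
    let mid := PySem.Int.floordiv (start + end_) 2
    match PySem.List.pyGet? nums mid with
    | some v =>
      if v ≤ target then findLoop nums target (mid + 1) end_
      else findLoop nums target start (mid - 1)
    | none => end_   -- unreachable from find's call: mid is always a valid index there
  else end_
termination_by (end_ + 1 - start).toNat
decreasing_by
  all_goals
    have h2 := PySem.Int.floordiv_two_mid_bounds (show start ≤ end_ by omega)
    omega

def find (nums : List Int) (target : Int) : Int :=
  findLoop nums target 0 ((nums.length : Int) - 1) - (-1)

-- ===== PORT B =====
-- B's recursive helper go(sub, offset): recursion on list slices, carrying an absolute offset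
def findGo (target : Int) (sub : List Int) (offset : Int) : Int :=
  if _h : sub.isEmpty then offset
  else
    let k : Nat := (sub.length - 1) / 2
    match PySem.List.pyGet? sub (k : Int) with
    | some v =>
      if v ≤ target then
        findGo target (PySem.List.slice sub (some ((k : Int) + 1)) none) (offset + k + 1)
      else
        findGo target (PySem.List.slice sub none (some (k : Int))) offset
    | none => offset   -- unreachable: k < sub.length
termination_by sub.length
decreasing_by
  · have hk : ((k : Int) + 1) = (((k + 1 : Nat) : Int)) := by push_cast; ring
    rw [hk, PySem.List.slice_from_natCast]
    have hne : sub.length ≠ 0 := by simpa [List.isEmpty_iff_length_eq_zero] using _h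
    simp [List.length_drop]; omega
  · rw [PySem.List.slice_to_natCast]
    have hne : sub.length ≠ 0 := by simpa [List.isEmpty_iff_length_eq_zero] using _h
    simp [List.length_take]; omega

def find_alt (nums : List Int) (target : Int) : Int :=
  findGo target nums 0

-- ===== PRECONDITION & SPEC =====
def Spec_find (nums : List Int) (target : Int) (out : Int) : Prop := out = find_alt nums target
instance (nums : List Int) (target : Int) (out : Int) : Decidable (Spec_find nums target out) := by unfold Spec_find; infer_instance

-- ===== CLAIM (what is proved, stated in full; the proofs are below) =====
def Claim_equal_find : Prop := ∀ (nums : List Int) (target : Int), Dom_find nums target → Spec_find nums target (find nums target)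

-- ===== LEMMAS AND PROOFS =====

-- Bridge: B's go on the contiguous segment nums[s : s+n] with offset s computes
-- the final `end` of A's loop on [s, s+n-1], plus one.
theorem findGo_eq_findLoop (nums : List Int) (target : Int) :
    ∀ (n s : Nat), s + n ≤ nums.length →
      findGo target ((nums.drop s).take n) (s : Int)
        = findLoop nums target (s : Int) ((s : Int) + (n : Int) - 1) + 1 := by
  intro n
  induction n using Nat.strong_induction_on with
  | _ n ih =>
    intro s hsn
    by_cases hn : n = 0
    · subst hn
      simp only [List.take_zero]
      rw [findGo, findLoop]
      simp
    · have hn1 : 1 ≤ n := by omega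
      have hlen : ((nums.drop s).take n).length = n := by
        simp [List.length_take, List.length_drop]; omega
      have hkn : (n - 1) / 2 < n := by omega
      have hsk : s + (n - 1) / 2 < nums.length := by omega
      have hne : ¬ ((nums.drop s).take n).isEmpty = true := by
        rw [List.isEmpty_iff]
        intro he
        rw [he] at hlen
        simp at hlen
        omega
      have hle : (s : Int) ≤ (s : Int) + (n : Int) - 1 := by omega
      have hmid : PySem.Int.floordiv ((s : Int) + ((s : Int) + (n : Int) - 1)) 2
          = ((s + (n - 1) / 2 : Nat) : Int) := by
        have h2 : ((s : Int) + ((s : Int) + (n : Int) - 1)) = ((2 * s + (n - 1) : Nat) : Int) := by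
          push_cast; omega
        rw [h2, show (2 : Int) = ((2 : Nat) : Int) from rfl, PySem.Int.floordiv_natCast]
        push_cast; omega
      have hget : ((nums.drop s).take n)[(n - 1) / 2]? = nums[s + (n - 1) / 2]? := by
        rw [List.getElem?_take_of_lt (by omega), List.getElem?_drop]
      have hv : PySem.List.pyGet? ((nums.drop s).take n) (((n - 1) / 2 : Nat) : Int)
          = some nums[s + (n - 1) / 2] := by
        rw [PySem.List.pyGet?_natCast, hget, List.getElem?_eq_getElem hsk]
      have hvA : PySem.List.pyGet? nums (((s + (n - 1) / 2 : Nat)) : Int)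
          = some nums[s + (n - 1) / 2] := by
        rw [PySem.List.pyGet?_natCast, List.getElem?_eq_getElem hsk]
      rw [findGo, findLoop, dif_neg hne, dif_pos hle]
      simp only [hlen, hmid, hv, hvA]
      split_ifs with hcmp
      · -- go right: sub.drop ((n-1)/2 + 1) at offset s + (n-1)/2 + 1
        have hslice : PySem.List.slice ((nums.drop s).take n) (some ((((n - 1) / 2 : Nat) : Int) + 1)) none
            = (nums.drop (s + ((n - 1) / 2 + 1))).take (n - ((n - 1) / 2 + 1)) := by
          rw [show ((((n - 1) / 2 : Nat) : Int) + 1) = ((((n - 1) / 2 + 1 : Nat)) : Int) by push_cast; ring,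
            PySem.List.slice_from_natCast, List.drop_take, List.drop_drop]
        rw [hslice]
        have hrec := ih (n - ((n - 1) / 2 + 1)) (by omega) (s + ((n - 1) / 2 + 1)) (by omega)
        convert hrec using 3 <;> omega
      · -- go left: sub.take ((n-1)/2) at offset s
        have hslice : PySem.List.slice ((nums.drop s).take n) none (some (((n - 1) / 2 : Nat) : Int))
            = (nums.drop s).take ((n - 1) / 2) := by
          rw [PySem.List.slice_to_natCast, List.take_take]
          congr 1
          omega
        rw [hslice]
        have hrec := ih ((n - 1) / 2) (by omega) s (by omega)
        convert hrec using 3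

-- ===== VERDICT (by name: the statement is the Claim_ definition above) =====
theorem find_spec : Claim_equal_find := by
  intro nums target _
  unfold Spec_find find find_alt
  have h := findGo_eq_findLoop nums target nums.length 0 (by omega)
  simp only [List.drop_zero, List.take_length, Nat.cast_zero, zero_add] at h
  omega
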